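-- pv_equiv track=rewrite | github.com/lcgeneralprojects/file-manager | main.py | find_end_of_exercise_number
-- ===== SOURCE A (Python) =====
-- def find_end_of_prefix(file):
--     for i in range(len(file)):
--         if file[i].isdigit():
--             return -1  # No prefix found
--         elif file[i] == '_':
--             return i
--     return -1  # No prefix found
--
-- def find_end_of_exercise_number(file):
--     prefix_end = find_end_of_prefix(file) + 1
--     for i in range(prefix_end, len(file)):
--         if file[i].isalpha():
--             return prefix_end  # No exercise number found
--         elif file[i] == '_':
--             return i
--     return prefix_end  # No exercise number found
-- ===== SOURCE B (Python) =====
-- def find_end_of_exercise_number(file):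
--     u = file.find('_')
--     if u != -1 and not any(c.isdigit() for c in file[:u]):
--         prefix_end = u + 1
--     else:
--         prefix_end = 0
--     v = file.find('_', prefix_end)
--     if v != -1 and not any(c.isalpha() for c in file[prefix_end:v]):
--         return v
--     return prefix_end
-- ===== Notes on version B (the rewrite author's own statement) =====
-- stated objective: simpler
-- what changed: Replaced the two interleaved locate-and-validate character loops (helper find_end_of_prefix plus an indexed scan) with a locate-then-validate decomposition: str.find locates each underscore and a slice digit/alpha membership test validates the region before it.
import Mathlib
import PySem

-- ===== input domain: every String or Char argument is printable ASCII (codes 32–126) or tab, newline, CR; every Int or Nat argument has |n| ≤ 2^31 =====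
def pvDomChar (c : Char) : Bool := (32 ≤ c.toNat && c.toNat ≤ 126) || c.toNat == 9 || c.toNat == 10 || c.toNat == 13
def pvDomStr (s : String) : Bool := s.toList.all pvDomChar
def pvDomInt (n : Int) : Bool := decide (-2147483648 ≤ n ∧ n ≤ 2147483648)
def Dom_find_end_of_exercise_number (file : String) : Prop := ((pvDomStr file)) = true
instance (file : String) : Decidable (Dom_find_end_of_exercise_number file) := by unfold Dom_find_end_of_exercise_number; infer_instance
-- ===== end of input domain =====

-- B replaces A's two interleaved locate-and-validate loops by str.find plus slice checks (simpler decomposition, same O(n) cost).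

-- ===== PORT A =====
-- for i in range(len(file)): digit → -1; '_' → i;  else fall through;  end → -1
def pvAPrefix : List Char → Nat → Int
  | [], _ => -1
  | c :: rest, i =>
    if PySem.Chars.isdigit c then -1
    else if c = '_' then (i : Int)
    else pvAPrefix rest (i + 1)

-- for i in range(prefix_end, len(file)): alpha → prefix_end; '_' → i; end → prefix_end
def pvALoop : List Char → Nat → Int → Int
  | [], _, pe => pe
  | c :: rest, i, pe =>
    if PySem.Chars.isalpha c then pe
    else if c = '_' then (i : Int)
    else pvALoop rest (i + 1) pe

def find_end_of_exercise_number (file : String) : Int :=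
  let prefix_end : Int := pvAPrefix file.toList 0 + 1
  pvALoop (file.toList.drop prefix_end.toNat) prefix_end.toNat prefix_end

-- ===== PORT B =====
def find_end_of_exercise_number_alt (file : String) : Int :=
  let cs := file.toList
  let u := PySem.Chars.find cs ['_']
  let prefix_end : Int :=
    if u ≠ -1 ∧ (PySem.List.slice cs none (some u)).all (fun c => !PySem.Chars.isdigit c)
    then u + 1 else 0
  let v := PySem.Chars.findFrom cs ['_'] prefix_end
  if v ≠ -1 ∧ (PySem.List.slice cs (some prefix_end) (some v)).all (fun c => !PySem.Chars.isalpha c)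
  then v else prefix_end

-- ===== PRECONDITION & SPEC =====
def Spec_find_end_of_exercise_number (file : String) (out : Int) : Prop := out = find_end_of_exercise_number_alt file
instance (file : String) (out : Int) : Decidable (Spec_find_end_of_exercise_number file out) := by unfold Spec_find_end_of_exercise_number; infer_instance

-- ===== CLAIM (what is proved, stated in full; the proofs are below) =====
def Claim_equal_find_end_of_exercise_number : Prop := ∀ (file : String), Dom_find_end_of_exercise_number file → Spec_find_end_of_exercise_number file (find_end_of_exercise_number file)

-- ===== LEMMAS AND PROOFS =====

theorem singleton_infix_iff_mem (d : Char) (s : List Char) : [d] <:+: s ↔ d ∈ s := by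
  constructor
  · intro h; exact h.mem (by simp)
  · intro h
    obtain ⟨l1, l2, rfl⟩ := List.append_of_mem h
    exact ⟨l1, l2, by simp⟩

theorem find_eq_of_first (s sub : List Char) (k : Nat)
    (h1 : sub <+: s.drop k) (h2 : ∀ i < k, ¬ sub <+: s.drop i) :
    PySem.Chars.find s sub = (k : Int) := by
  have hinf : sub <:+: s := by
    obtain ⟨t, ht⟩ := h1
    exact ⟨s.take k, t, by rw [List.append_assoc, ht, List.take_append_drop]⟩
  have h0 : 0 ≤ PySem.Chars.find s sub := (PySem.Chars.find_nonneg_iff s sub).mpr hinf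
  obtain ⟨hp, hmin⟩ := PySem.Chars.find_spec h0
  have : (PySem.Chars.find s sub).toNat = k := by
    rcases Nat.lt_trichotomy (PySem.Chars.find s sub).toNat k with h | h | h
    · exact absurd hp (h2 _ h)
    · exact h
    · exact absurd h1 (hmin _ h)
  omega

theorem find_underscore_cons (c : Char) (l : List Char) :
    PySem.Chars.find (c :: l) ['_'] =
      if c = '_' then 0
      else if PySem.Chars.find l ['_'] = -1 then -1
      else PySem.Chars.find l ['_'] + 1 := by
  by_cases hc : c = '_'
  · rw [if_pos hc]
    exact find_eq_of_first _ _ 0 (by simp [hc]) (by omega)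
  · rw [if_neg hc]
    by_cases hl : PySem.Chars.find l ['_'] = -1
    · rw [if_pos hl]
      rw [PySem.Chars.find_eq_neg_one_iff] at hl ⊢
      rw [singleton_infix_iff_mem] at hl ⊢
      simp only [List.mem_cons, not_or]
      exact ⟨fun h => hc h.symm, hl⟩
    · rw [if_neg hl]
      have h0 : 0 ≤ PySem.Chars.find l ['_'] := by
        have := PySem.Chars.neg_one_le_find (s := l) (sub := ['_'])
        omega
      obtain ⟨hp, hmin⟩ := PySem.Chars.find_spec h0
      have hk : PySem.Chars.find (c :: l) ['_'] = (((PySem.Chars.find l ['_']).toNat + 1 : Nat) : Int) := by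
        apply find_eq_of_first
        · simpa using hp
        · intro i hi
          match i with
          | 0 =>
            simp only [List.drop_zero, List.cons_prefix_cons]
            rintro ⟨h, -⟩
            exact hc h.symm
          | (j+1) => simpa using hmin j (by omega)
      rw [hk]; push_cast; omega

-- second-stage equivalence, i/pe generalized
theorem loopA_eq (l : List Char) (i : Nat) (pe : Int) :
    pvALoop l i pe =
      (if PySem.Chars.find l ['_'] ≠ -1 ∧
          (l.take (PySem.Chars.find l ['_']).toNat).all (fun c => !PySem.Chars.isalpha c)
       then (i : Int) + PySem.Chars.find l ['_'] else pe) := by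
  induction l generalizing i with
  | nil =>
    have : PySem.Chars.find [] ['_'] = -1 := by
      rw [PySem.Chars.find_eq_neg_one_iff, singleton_infix_iff_mem]; simp
    simp [pvALoop, this]
  | cons c rest ih =>
    rw [pvALoop, find_underscore_cons]
    by_cases hc : c = '_'
    · subst hc
      have ha : PySem.Chars.isalpha '_' = false := by decide
      simp [ha]
    · simp only [if_neg hc]
      by_cases hr : PySem.Chars.find rest ['_'] = -1
      · by_cases ha : PySem.Chars.isalpha c = true
        · simp [ha, hr]
        · simp only [Bool.not_eq_true] at ha
          rw [if_neg (by simp [ha]), ih (i + 1)]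
          simp [hr]
      · have h0 : 0 ≤ PySem.Chars.find rest ['_'] := by
          have := PySem.Chars.neg_one_le_find (s := rest) (sub := ['_'])
          omega
        have ht : (PySem.Chars.find rest ['_'] + 1).toNat
             = (PySem.Chars.find rest ['_']).toNat + 1 := by omega
        have hne : PySem.Chars.find rest ['_'] + 1 ≠ -1 := by omega
        simp only [if_neg hr]
        by_cases ha : PySem.Chars.isalpha c = true
        · rw [if_pos ha]
          rw [if_neg (by simp [ht, List.all_cons, ha])]
        · simp only [Bool.not_eq_true] at ha
          rw [if_neg (by simp [ha]), ih (i + 1)]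
          simp only [ht, List.take_succ_cons, List.all_cons, ha, Bool.not_false, Bool.true_and, hne,
            ne_eq, hr, not_false_iff, true_and]
          split_ifs <;> push_cast <;> omega

-- first-stage equivalence: A's prefix scan vs B's find + digit-free check, index generalized
theorem prefixA_eq (cs : List Char) (i : Nat) :
    pvAPrefix cs i + 1 =
      (if PySem.Chars.find cs ['_'] ≠ -1 ∧
          (cs.take (PySem.Chars.find cs ['_']).toNat).all (fun c => !PySem.Chars.isdigit c)
       then (i : Int) + PySem.Chars.find cs ['_'] + 1 else 0) := by
  induction cs generalizing i with
  | nil =>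
    have : PySem.Chars.find [] ['_'] = -1 := by
      rw [PySem.Chars.find_eq_neg_one_iff, singleton_infix_iff_mem]; simp
    simp [pvAPrefix, this]
  | cons c rest ih =>
    rw [pvAPrefix, find_underscore_cons]
    by_cases hc : c = '_'
    · subst hc
      have hd : PySem.Chars.isdigit '_' = false := by decide
      simp [hd]
    · simp only [if_neg hc]
      by_cases hr : PySem.Chars.find rest ['_'] = -1
      · by_cases hd : PySem.Chars.isdigit c = true
        · simp [hd, hr]
        · simp only [Bool.not_eq_true] at hd
          rw [if_neg (by simp [hd]), ih (i + 1)]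
          simp [hr]
      · have h0 : 0 ≤ PySem.Chars.find rest ['_'] := by
          have := PySem.Chars.neg_one_le_find (s := rest) (sub := ['_'])
          omega
        have ht : (PySem.Chars.find rest ['_'] + 1).toNat
             = (PySem.Chars.find rest ['_']).toNat + 1 := by omega
        have hne : PySem.Chars.find rest ['_'] + 1 ≠ -1 := by omega
        simp only [if_neg hr]
        by_cases hd : PySem.Chars.isdigit c = true
        · rw [if_pos hd]
          rw [if_neg (by simp [ht, List.all_cons, hd])]
          norm_num
        · simp only [Bool.not_eq_true] at hd
          rw [if_neg (by simp [hd]), ih (i + 1)]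
          simp only [ht, List.take_succ_cons, List.all_cons, hd, Bool.not_false, Bool.true_and, hne,
            ne_eq, hr, not_false_iff, true_and]
          split_ifs <;> push_cast
          omega

theorem pvAPrefix_bound (cs : List Char) (i : Nat) :
    -1 ≤ pvAPrefix cs i ∧ pvAPrefix cs i < (i : Int) + cs.length := by
  induction cs generalizing i with
  | nil =>
    simp only [pvAPrefix, List.length_nil]
    omega
  | cons c rest ih =>
    rw [pvAPrefix]
    have h := ih (i + 1)
    split_ifs with h1 h2
    · refine ⟨by omega, ?_⟩
      simp only [List.length_cons]; push_cast; omega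
    · refine ⟨by omega, ?_⟩
      simp only [List.length_cons]; push_cast; omega
    · simp only [List.length_cons]
      push_cast at h ⊢
      omega

-- ===== VERDICT (by name: the statement is the Claim_ definition above) =====
theorem find_end_of_exercise_number_spec : Claim_equal_find_end_of_exercise_number := by
  intro file _
  unfold Spec_find_end_of_exercise_number
  unfold find_end_of_exercise_number find_end_of_exercise_number_alt
  simp only []
  set cs := file.toList with hcs
  set u := PySem.Chars.find cs ['_'] with hu
  have hu1 : -1 ≤ u := PySem.Chars.neg_one_le_find cs ['_']
  have hu2 : u ≤ (cs.length : Int) := PySem.Chars.find_le_length cs ['_']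
  have hslice : u ≠ -1 → PySem.List.slice cs none (some u) = cs.take u.toNat := by
    intro h
    have hcast : u = ((u.toNat : Nat) : Int) := by omega
    rw [hcast, PySem.List.slice_to_natCast]
    simp
    omega
  have hpe : pvAPrefix cs 0 + 1 =
      (if u ≠ -1 ∧ (PySem.List.slice cs none (some u)).all (fun c => !PySem.Chars.isdigit c)
       then u + 1 else 0) := by
    rw [prefixA_eq cs 0]
    by_cases h : u = -1
    · simp [h, ← hu]
    · rw [hslice h, ← hu]
      simp [h]
  rw [← hpe]
  have hb := pvAPrefix_bound cs 0
  obtain ⟨n, hn⟩ : ∃ n : Nat, pvAPrefix cs 0 + 1 = (n : Int) := ⟨(pvAPrefix cs 0 + 1).toNat, by omega⟩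
  have hnl : n ≤ cs.length := by simp at hb; omega
  rw [hn]
  simp only [Int.toNat_natCast]
  rw [PySem.Chars.findFrom_natCast cs ['_'] n hnl]
  set m := PySem.Chars.find (cs.drop n) ['_'] with hm
  have hm1 : -1 ≤ m := PySem.Chars.neg_one_le_find _ ['_']
  rw [loopA_eq (cs.drop n) n (n : Int)]
  by_cases hmm : m = -1
  · rw [← hm]
    simp [hmm]
  · have hmc : m = ((m.toNat : Nat) : Int) := by omega
    have hsl : PySem.List.slice cs (some (n : Int)) (some ((n : Int) + m)) = (cs.drop n).take m.toNat := by
      rw [hmc, PySem.List.slice_natCast_add]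
      simp
      omega
    rw [← hm]
    simp only [if_neg hmm]
    rw [hsl]
    have hne : ((n : Int) + m ≠ -1) := by omega
    simp [hmm, hne]
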